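-- pv_equiv track=rewrite | github.com/EdPike365/python | main.py | build_word_pyramid
-- ===== SOURCE A (Python) =====
-- def build_word_pyramid(list_of_words):
--
--     # Create an empty pyramid that will hold multiple levels.
--     pyramid = []
--
--     # Create an empty level.
--     this_level = []
--
--     # Iterate over the list of words and build the pyramid level by level.
--     for word in list_of_words:
--         this_level.append(word)
--         if( len(this_level) == len(pyramid) + 1):
--             pyramid.append(this_level)
--             # Reset the level to start a new one.
--             this_level = []
--     return pyramid
-- ===== SOURCE B (Python) =====
-- def build_word_pyramid(list_of_words):
--     # Slice complete levels at triangular-number offsets; a trailing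
--     # partial level never fits the while-condition and is dropped.
--     pyramid = []
--     start = 0
--     k = 1
--     while start + k <= len(list_of_words):
--         pyramid.append(list_of_words[start:start + k])
--         start += k
--         k += 1
--     return pyramid
-- ===== Notes on version B (the rewrite author's own statement) =====
-- stated objective: alternative
-- what changed: B slices whole levels at triangular-number offsets with a running start index and level size, instead of appending word-by-word and flushing a buffer when its length matches the pyramid height.
import Mathlib
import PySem

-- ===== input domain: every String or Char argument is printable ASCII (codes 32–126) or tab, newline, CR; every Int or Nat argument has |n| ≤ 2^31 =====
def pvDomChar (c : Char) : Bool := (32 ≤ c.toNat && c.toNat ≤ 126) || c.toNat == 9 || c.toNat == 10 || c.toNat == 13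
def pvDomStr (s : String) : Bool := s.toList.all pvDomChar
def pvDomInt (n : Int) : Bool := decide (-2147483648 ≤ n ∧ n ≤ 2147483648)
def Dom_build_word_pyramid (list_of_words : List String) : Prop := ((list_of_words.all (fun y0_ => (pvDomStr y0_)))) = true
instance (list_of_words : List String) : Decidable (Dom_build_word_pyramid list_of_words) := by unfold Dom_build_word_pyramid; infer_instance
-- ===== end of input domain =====

-- B groups the words into pyramid levels by slicing at triangular-number offsets
-- (running start index and growing level size) instead of A's word-by-word buffer
-- that is flushed when its length reaches the pyramid height + 1 (objective: alternative).

-- ===== PORT A =====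
-- the body of A's for-loop, acting on the state (pyramid, this_level)
def pvStepA (st : List (List String) × List String) (word : String) :
    List (List String) × List String :=
  let this_level := st.2 ++ [word]
  if this_level.length = st.1.length + 1 then (st.1 ++ [this_level], [])
  else (st.1, this_level)

def build_word_pyramid (list_of_words : List String) : List (List String) :=
  (list_of_words.foldl pvStepA ([], [])).1

-- ===== PORT B =====
-- the while-loop of B: state (pyramid, start, k); hk is only a totality guard
-- (in B, k starts at 1 and only grows, so 0 < k always holds)
def pvGoB (xs : List String) (pyramid : List (List String)) (start k : Nat)
    (hk : 0 < k) : List (List String) :=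
  if h : start + k ≤ xs.length then
    pvGoB xs (pyramid ++ [PySem.List.slice xs (some (start : Int)) (some ((start : Int) + (k : Int)))])
      (start + k) (k + 1) (by omega)
  else pyramid
termination_by xs.length - start
decreasing_by omega

def build_word_pyramid_alt (list_of_words : List String) : List (List String) :=
  pvGoB list_of_words [] 0 1 (by omega)

-- ===== PRECONDITION & SPEC =====
def Spec_build_word_pyramid (list_of_words : List String) (out : List (List String)) : Prop := out = build_word_pyramid_alt list_of_words
instance (list_of_words : List String) (out : List (List String)) : Decidable (Spec_build_word_pyramid list_of_words out) := by unfold Spec_build_word_pyramid; infer_instance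

-- ===== CLAIM (what is proved, stated in full; the proofs are below) =====
def Claim_equal_build_word_pyramid : Prop := ∀ (list_of_words : List String), Dom_build_word_pyramid list_of_words → Spec_build_word_pyramid list_of_words (build_word_pyramid list_of_words)

-- ===== LEMMAS AND PROOFS =====

-- common reference function: the complete levels of sizes k, k+1, …
def pvChunks (xs : List String) (k : Nat) : List (List String) :=
  if h : 0 < k ∧ k ≤ xs.length then xs.take k :: pvChunks (xs.drop k) (k + 1)
  else []
termination_by xs.length
decreasing_by simp; omega

-- B's loop produces the chunks of the remaining suffix
theorem pvGoB_eq_chunks (xs : List String) (p : List (List String)) (start k : Nat)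
    (hk : 0 < k) : pvGoB xs p start k hk = p ++ pvChunks (xs.drop start) k := by
  fun_induction pvGoB xs p start k hk with
  | case1 p start k hk h ih =>
    have hr : pvChunks (xs.drop start) k
        = (xs.drop start).take k :: pvChunks ((xs.drop start).drop k) (k + 1) := by
      rw [pvChunks, dif_pos ⟨hk, by simp; omega⟩]
    rw [ih, hr]
    simp [PySem.List.slice_natCast_add, List.drop_drop]
  | case2 p start k hk h =>
    rw [pvChunks, dif_neg (by simp; omega)]
    simp

-- A's loop, fed exactly the words completing the current level, flushes it
theorem pvFillA (ys : List String) : ∀ (p : List (List String)) (l : List String),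
    l.length ≤ p.length → l.length + ys.length = p.length + 1 →
    List.foldl pvStepA (p, l) ys = (p ++ [l ++ ys], []) := by
  induction ys with
  | nil => intro p l h1 h2; simp at h2; omega
  | cons y ys ih =>
    intro p l h1 h2
    simp only [List.foldl_cons, pvStepA]
    by_cases hc : (l ++ [y]).length = p.length + 1
    · have hys : ys = [] := by
        have := hc; simp at this; simp at h2
        exact List.eq_nil_of_length_eq_zero (by omega)
      subst hys; simp [hc]
    · rw [if_neg hc]
      have := ih p (l ++ [y]) (by simp at hc ⊢; omega) (by simp at h2 ⊢; omega)
      rw [this]; simp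

-- A's loop, fed too few words to complete the current level, only buffers them
theorem pvNoFillA (ys : List String) : ∀ (p : List (List String)) (l : List String),
    l.length + ys.length ≤ p.length →
    List.foldl pvStepA (p, l) ys = (p, l ++ ys) := by
  induction ys with
  | nil => intro p l _; simp
  | cons y ys ih =>
    intro p l h
    simp only [List.foldl_cons, pvStepA]
    rw [if_neg (by simp at h ⊢; omega)]
    rw [ih p (l ++ [y]) (by simp at h ⊢; omega)]; simp

-- A's loop from an empty buffer produces the chunks of sizes p.length+1, …
theorem pvFoldA_eq_chunks (n : Nat) : ∀ (xs : List String) (p : List (List String)),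
    xs.length ≤ n →
    (List.foldl pvStepA (p, []) xs).1 = p ++ pvChunks xs (p.length + 1) := by
  induction n with
  | zero =>
    intro xs p hn
    have hx : xs = [] := List.eq_nil_of_length_eq_zero (by omega)
    subst hx
    rw [pvChunks, dif_neg (by simp)]
    simp
  | succ m ih =>
    intro xs p hn
    by_cases h : p.length + 1 ≤ xs.length
    · have hsplit := List.take_append_drop (p.length + 1) xs
      conv_lhs => rw [← hsplit]
      rw [List.foldl_append]
      rw [pvFillA (xs.take (p.length + 1)) p [] (by simp) (by simp; omega)]
      simp only [List.nil_append]
      rw [ih (xs.drop (p.length + 1)) (p ++ [xs.take (p.length + 1)]) (by simp; omega)]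
      have hr : pvChunks xs (p.length + 1)
          = xs.take (p.length + 1) :: pvChunks (xs.drop (p.length + 1)) (p.length + 2) := by
        rw [pvChunks, dif_pos ⟨by omega, h⟩]
      rw [hr]
      simp [List.append_assoc]
    · rw [pvNoFillA xs p [] (by simp; omega)]
      rw [pvChunks, dif_neg (by simp; omega)]
      simp

-- ===== VERDICT (by name: the statement is the Claim_ definition above) =====
theorem build_word_pyramid_spec : Claim_equal_build_word_pyramid := by
  intro xs _
  unfold Spec_build_word_pyramid build_word_pyramid build_word_pyramid_alt
  rw [pvFoldA_eq_chunks xs.length xs [] le_rfl, pvGoB_eq_chunks]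
  simp
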